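-- pv_equiv track=rewrite | github.com/Manitary/advent-of-code | 2016/python/day07.py | is_tls
-- ===== SOURCE A (Python) =====
-- def is_abba(s: str, i: int) -> bool:
--     return s[i] == s[i + 3] != s[i + 1] == s[i + 2] and s[i : i + 4].isalpha()
--
-- def is_tls(s: str) -> bool:
--     abba = False
--     brackets = 0
--     for i in range(len(s) - 3):
--         if s[i] == "[":
--             brackets += 1
--             continue
--         if s[i] == "]":
--             brackets -= 1
--             continue
--         if brackets and is_abba(s, i):
--             return False
--         if (not abba) and is_abba(s, i):
--             abba = True
--     return abba
-- ===== SOURCE B (Python) =====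
-- def _has_abba(t: str) -> bool:
--     return any(a == d != b == c and (a + b + c + d).isalpha()
--                for a, b, c, d in zip(t, t[1:], t[2:], t[3:]))
--
--
-- def is_tls(s: str) -> bool:
--     # First pass: cut s into maximal bracket-free runs, each tagged with the
--     # bracket depth it sits at.  Second pass: any ABBA at non-zero depth kills
--     # it; otherwise the answer is whether some depth-0 run has an ABBA.
--     segs = []
--     depth = 0
--     cur = []
--     for ch in s:
--         if ch == "[" or ch == "]":
--             segs.append(("".join(cur), depth))
--             cur = []
--             depth += 1 if ch == "[" else -1
--         else:
--             cur.append(ch)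
--     segs.append(("".join(cur), depth))
--
--     outside = False
--     for text, d in segs:
--         if _has_abba(text):
--             if d != 0:
--                 return False
--             outside = True
--     return outside
-- ===== Notes on version B (the rewrite author's own statement) =====
-- stated objective: simpler
-- what changed: A checks every index in one loop with a live bracket counter, per-index is_abba calls and slicing; B first cuts the string into maximal bracket-free runs tagged with their bracket depth and then scans each run once for an ABBA via zip, rejecting on any run at non-zero depth with an ABBA (constant-factor faster: no per-index function call and no per-index 4-char slice).
import Mathlib
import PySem

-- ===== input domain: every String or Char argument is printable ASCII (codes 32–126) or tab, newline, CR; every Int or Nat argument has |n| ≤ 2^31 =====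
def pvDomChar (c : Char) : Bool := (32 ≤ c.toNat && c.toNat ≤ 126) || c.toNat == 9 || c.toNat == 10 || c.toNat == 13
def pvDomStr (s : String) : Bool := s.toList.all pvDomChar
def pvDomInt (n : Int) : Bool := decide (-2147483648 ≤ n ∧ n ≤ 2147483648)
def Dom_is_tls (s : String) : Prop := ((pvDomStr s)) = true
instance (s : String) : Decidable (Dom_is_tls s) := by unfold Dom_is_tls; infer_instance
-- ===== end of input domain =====

-- B replaces A's index loop with a segment decomposition (bracket-free runs tagged
-- with their bracket depth, then an ABBA scan per run); objective: simpler.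

-- ===== PORT A =====
-- is_abba(s, i): s[i] == s[i+3] != s[i+1] == s[i+2] and s[i:i+4].isalpha()
def is_abba (cs : List Char) (i : Int) : Bool :=
  ((PySem.List.pyGet? cs i == PySem.List.pyGet? cs (i + 3)) &&
   (PySem.List.pyGet? cs (i + 3) != PySem.List.pyGet? cs (i + 1)) &&
   (PySem.List.pyGet? cs (i + 1) == PySem.List.pyGet? cs (i + 2))) &&
  PySem.Chars.strIsalpha (PySem.List.slice cs (some i) (some (i + 4)))

-- the for-loop of A, state (abba, brackets), early return False
def tlsLoop (cs : List Char) (idxs : List Int) (abba : Bool) (brackets : Int) : Bool :=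
  match idxs with
  | [] => abba
  | i :: rest =>
    if PySem.List.pyGet? cs i == some '[' then tlsLoop cs rest abba (brackets + 1)
    else if PySem.List.pyGet? cs i == some ']' then tlsLoop cs rest abba (brackets - 1)
    else if brackets != 0 && is_abba cs i then false
    else if !abba && is_abba cs i then tlsLoop cs rest true brackets
    else tlsLoop cs rest abba brackets

def is_tls (s : String) : Bool :=
  tlsLoop s.toList (PySem.List.pyRange 0 (PySem.Str.len s - 3) 1) false 0

-- ===== PORT B =====
-- _has_abba(t): any(... for a,b,c,d in zip(t, t[1:], t[2:], t[3:]))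
def hasAbba : List Char → Bool
  | a :: b :: c :: d :: rest =>
    ((a == d) && (d != b) && (b == c) && PySem.Chars.strIsalpha [a, b, c, d]) ||
      hasAbba (b :: c :: d :: rest)
  | _ => false

-- first pass: cut into bracket-free runs tagged with their depth
def buildSegs : List Char → Int → List Char → List (List Char × Int)
  | [], depth, cur => [(cur, depth)]
  | ch :: rest, depth, cur =>
    if ch == '[' then (cur, depth) :: buildSegs rest (depth + 1) []
    else if ch == ']' then (cur, depth) :: buildSegs rest (depth - 1) []
    else buildSegs rest depth (cur ++ [ch])

-- second pass over the runs, early return False on an ABBA at non-zero depth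
def checkSegs : List (List Char × Int) → Bool → Bool
  | [], outside => outside
  | (t, d) :: rest, outside =>
    if hasAbba t then (if d != 0 then false else checkSegs rest true)
    else checkSegs rest outside

def is_tls_alt (s : String) : Bool :=
  checkSegs (buildSegs s.toList 0 []) false

-- ===== PRECONDITION & SPEC =====
def Spec_is_tls (s : String) (out : Bool) : Prop := out = is_tls_alt s
instance (s : String) (out : Bool) : Decidable (Spec_is_tls s out) := by unfold Spec_is_tls; infer_instance

-- ===== CLAIM (what is proved, stated in full; the proofs are below) =====
def Claim_equal_is_tls : Prop := ∀ (s : String), Dom_is_tls s → Spec_is_tls s (is_tls s)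

-- ===== LEMMAS AND PROOFS =====

-- head4 l: the 4-char window at the head of l is an ABBA
def head4 : List Char → Bool
  | a :: b :: c :: d :: _ =>
    (a == d) && (d != b) && (b == c) &&
      (PySem.Chars.isalpha a && PySem.Chars.isalpha b && PySem.Chars.isalpha c && PySem.Chars.isalpha d)
  | _ => false

-- common reference: one structural pass with depth counter and abba flag
def ref : List Char → Int → Bool → Bool
  | [], _, abba => abba
  | c :: rest, depth, abba =>
    if c = '[' then ref rest (depth + 1) abba
    else if c = ']' then ref rest (depth - 1) abba
    else if head4 (c :: rest) then (if depth ≠ 0 then false else ref rest depth true)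
    else ref rest depth abba

theorem head4_short (l : List Char) (h : l.length < 4) : head4 l = false := by
  match l with
  | [] => rfl
  | [_] => rfl
  | [_, _] => rfl
  | [_, _, _] => rfl
  | _ :: _ :: _ :: _ :: _ => simp at h; omega

theorem ref_short (l : List Char) (h : l.length < 4) :
    ∀ (depth : Int) (abba : Bool), ref l depth abba = abba := by
  induction l with
  | nil => intro _ _; rfl
  | cons c rest ih =>
    intro depth abba
    have hh : head4 (c :: rest) = false := head4_short _ h
    have hr : rest.length < 4 := by simp at h; omega
    rw [ref]
    simp only [hh, Bool.false_eq_true, if_false]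
    split_ifs <;> exact ih hr _ _

theorem is_abba_eq_head4 (cs : List Char) (k : Nat) (h : k + 4 ≤ cs.length) :
    is_abba cs (k : Int) = head4 (cs.drop k) := by
  have h0 : k < cs.length := by omega
  have h1 : k + 1 < cs.length := by omega
  have h2 : k + 2 < cs.length := by omega
  have h3 : k + 3 < cs.length := by omega
  have hd : cs.drop k = cs[k] :: cs[k+1] :: cs[k+2] :: cs[k+3] :: cs.drop (k+4) := by
    rw [List.drop_eq_getElem_cons h0, List.drop_eq_getElem_cons h1,
        List.drop_eq_getElem_cons h2, List.drop_eq_getElem_cons h3]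
  have hslice : PySem.List.slice cs (some (k : Int)) (some ((k : Int) + 4)) =
      [cs[k], cs[k+1], cs[k+2], cs[k+3]] := by
    have : ((k : Int) + 4) = ((k + 4 : Nat) : Int) := by push_cast; ring
    rw [this, PySem.List.slice_natCast]
    have : (cs.drop k).take (k + 4 - k) = (cs.drop k).take 4 := by norm_num
    rw [this, hd]
    rfl
  have g0 : PySem.List.pyGet? cs ((k : Int)) = some cs[k] := by
    rw [PySem.List.pyGet?_natCast, List.getElem?_eq_getElem h0]
  have g1 : PySem.List.pyGet? cs ((k : Int) + 1) = some cs[k+1] := by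
    rw [show ((k : Int) + 1) = ((k + 1 : Nat) : Int) by push_cast; ring,
        PySem.List.pyGet?_natCast, List.getElem?_eq_getElem h1]
  have g2 : PySem.List.pyGet? cs ((k : Int) + 2) = some cs[k+2] := by
    rw [show ((k : Int) + 2) = ((k + 2 : Nat) : Int) by push_cast; ring,
        PySem.List.pyGet?_natCast, List.getElem?_eq_getElem h2]
  have g3 : PySem.List.pyGet? cs ((k : Int) + 3) = some cs[k+3] := by
    rw [show ((k : Int) + 3) = ((k + 3 : Nat) : Int) by push_cast; ring,
        PySem.List.pyGet?_natCast, List.getElem?_eq_getElem h3]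
  rw [hd]
  simp only [is_abba, head4, g0, g1, g2, g3, hslice, PySem.Chars.strIsalpha]
  simp [bne, Bool.and_assoc]

-- A's loop from index k equals the reference pass on the suffix
theorem tlsLoop_eq_ref (cs : List Char) :
    ∀ (m k : Nat) (abba : Bool) (depth : Int), cs.length - k ≤ m →
    tlsLoop cs (PySem.List.pyRange (k : Int) ((cs.length : Int) - 3) 1) abba depth =
      ref (cs.drop k) depth abba := by
  intro m
  induction m with
  | zero =>
    intro k abba depth hm
    have hk : cs.length ≤ k := by omega
    rw [PySem.List.pyRange_one_eq_nil (by omega), List.drop_eq_nil_of_le hk]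
    rfl
  | succ m ih =>
    intro k abba depth hm
    by_cases hend : (cs.length : Int) - 3 ≤ (k : Int)
    · rw [PySem.List.pyRange_one_eq_nil hend]
      exact (ref_short _ (by simp; omega) _ _).symm
    · have hk3 : k + 3 < cs.length := by omega
      have hkl : k < cs.length := by omega
      rw [PySem.List.pyRange_one_cons (by omega)]
      have hcast : ((k : Int) + 1) = ((k + 1 : Nat) : Int) := by push_cast; ring
      have hget : PySem.List.pyGet? cs ((k : Int)) = some cs[k] := by
        rw [PySem.List.pyGet?_natCast, List.getElem?_eq_getElem hkl]
      have hdrop : cs.drop k = cs[k] :: cs.drop (k + 1) := List.drop_eq_getElem_cons hkl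
      have habba := is_abba_eq_head4 cs k (by omega)
      rw [hdrop] at habba
      have ih' : ∀ (abba : Bool) (depth : Int),
          tlsLoop cs (PySem.List.pyRange ((k : Int) + 1) ((cs.length : Int) - 3) 1) abba depth =
            ref (cs.drop (k + 1)) depth abba := by
        intro a d; rw [hcast]; exact ih (k + 1) a d (by omega)
      rw [tlsLoop, hget, hdrop, ref]
      by_cases hbr1 : cs[k] = '['
      · simp [hbr1, ih']
      · by_cases hbr2 : cs[k] = ']'
        · have e1 : (some cs[k] == some '[') = false := by simp [hbr1]
          simp [hbr2, ih']
        · have e1 : (some cs[k] == some '[') = false := by simp [hbr1]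
          have e2 : (some cs[k] == some ']') = false := by simp [hbr2]
          simp only [e1, e2, Bool.false_eq_true, if_false, if_neg hbr1, if_neg hbr2, habba]
          by_cases hh : head4 (cs[k] :: cs.drop (k + 1)) = true
          · simp only [hh, Bool.and_true]
            by_cases hdz : depth = 0
            · subst hdz
              cases abba <;> simp [ih']
            · simp [show (depth != 0) = true by simpa using hdz, hdz]
          · simp only [Bool.not_eq_true] at hh
            rw [hh]
            simp only [Bool.and_false, Bool.false_eq_true, if_false]
            exact ih' abba depth

-- B-side: ABBA windows starting inside cur (with lookahead into l)
def hasAbbaPre : List Char → List Char → Bool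
  | [], _ => false
  | c :: rest, l => head4 (c :: (rest ++ l)) || hasAbbaPre rest l

theorem strIsalpha_four (a b c d : Char) :
    PySem.Chars.strIsalpha [a, b, c, d] =
      (PySem.Chars.isalpha a && PySem.Chars.isalpha b && PySem.Chars.isalpha c && PySem.Chars.isalpha d) := by
  simp [PySem.Chars.strIsalpha, Bool.and_assoc]

theorem hasAbba_eq_pre_nil (cur : List Char) : hasAbbaPre cur [] = hasAbba cur := by
  induction cur with
  | nil => rfl
  | cons c rest ih =>
    rw [hasAbbaPre, ih, List.append_nil]
    match rest with
    | [] => simp [head4, hasAbba]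
    | [_] => simp [head4, hasAbba]
    | [_, _] => simp [head4, hasAbba]
    | b :: c' :: d :: r =>
      simp [head4, hasAbba, strIsalpha_four, Bool.or_comm]

-- a window that would cross into a non-alphabetic first char of l is never an ABBA
-- head4 is false when a non-alphabetic char sits at offset 1, 2 or 3
theorem head4_na1 (a b : Char) (l : List Char) (hb : PySem.Chars.isalpha b = false) :
    head4 (a :: b :: l) = false := by
  match l with
  | [] => rfl
  | [_] => rfl
  | _ :: _ :: _ => simp [head4, hb]

theorem head4_na2 (a x b : Char) (l : List Char) (hb : PySem.Chars.isalpha b = false) :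
    head4 (a :: x :: b :: l) = false := by
  match l with
  | [] => rfl
  | _ :: _ => simp [head4, hb]

theorem head4_na3 (a x y b : Char) (l : List Char) (hb : PySem.Chars.isalpha b = false) :
    head4 (a :: x :: y :: b :: l) = false := by
  simp [head4, hb]

theorem hasAbbaPre_bracket (cur : List Char) (b : Char) (l : List Char)
    (hb : PySem.Chars.isalpha b = false) : hasAbbaPre cur (b :: l) = hasAbba cur := by
  induction cur with
  | nil => rfl
  | cons c rest ih =>
    rw [hasAbbaPre, ih]
    match rest with
    | [] => simp [head4_na1 _ _ _ hb, hasAbba]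
    | [x] => simp [head4_na2 _ _ _ _ hb, hasAbba]
    | [x, y] => simp [head4_na3 _ _ _ _ _ hb, hasAbba]
    | x :: y :: z :: r =>
      simp [head4, hasAbba, strIsalpha_four, Bool.or_comm]

-- a bracket-free prefix under the reference pass
theorem ref_append (cur : List Char) (l : List Char) (depth : Int) (abba : Bool)
    (hnb : ∀ c ∈ cur, c ≠ '[' ∧ c ≠ ']') :
    ref (cur ++ l) depth abba =
      if hasAbbaPre cur l && depth != 0 then false
      else ref l depth (abba || (hasAbbaPre cur l && depth == 0)) := by
  induction cur generalizing abba with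
  | nil => simp [hasAbbaPre]
  | cons c rest ih =>
    obtain ⟨hc1, hc2⟩ := hnb c (by simp)
    have hnb' : ∀ x ∈ rest, x ≠ '[' ∧ x ≠ ']' := fun x hx => hnb x (by simp [hx])
    rw [List.cons_append, ref, if_neg hc1, if_neg hc2]
    simp only [hasAbbaPre]
    by_cases hdz : depth = 0
    · subst hdz
      by_cases hh : head4 (c :: (rest ++ l)) = true
      · simp [hh, ih _ hnb']
      · simp only [Bool.not_eq_true] at hh
        simp [hh, ih _ hnb']
    · by_cases hh : head4 (c :: (rest ++ l)) = true
      · simp [hh, hdz]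
      · simp only [Bool.not_eq_true] at hh
        simp [hh, hdz, ih _ hnb']

-- B's two passes equal the reference pass
theorem checkSegs_buildSegs_eq_ref (l : List Char) :
    ∀ (depth : Int) (cur : List Char) (outside : Bool),
    (∀ c ∈ cur, c ≠ '[' ∧ c ≠ ']') →
    checkSegs (buildSegs l depth cur) outside = ref (cur ++ l) depth outside := by
  induction l with
  | nil =>
    intro depth cur outside hnb
    rw [buildSegs, checkSegs, ref_append cur [] depth outside hnb, hasAbba_eq_pre_nil]
    by_cases hdz : depth = 0
    · subst hdz
      by_cases hh : hasAbba cur = true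
      · simp [hh, checkSegs, ref]
      · simp only [Bool.not_eq_true] at hh
        simp [hh, checkSegs, ref]
    · by_cases hh : hasAbba cur = true
      · simp [hh, hdz]
      · simp only [Bool.not_eq_true] at hh
        simp [hh, checkSegs, ref]
  | cons ch rest ih =>
    intro depth cur outside hnb
    have ihe : ∀ (d : Int) (o : Bool), checkSegs (buildSegs rest d []) o = ref rest d o := by
      intro d o; rw [ih d [] o (by simp)]; rfl
    by_cases hb1 : ch = '['
    · subst hb1
      rw [buildSegs]
      simp only [if_pos (by rfl : ('[' == '[') = true)]
      rw [checkSegs, ref_append cur _ depth outside hnb,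
          hasAbbaPre_bracket cur '[' rest (by decide)]
      by_cases hdz : depth = 0
      · subst hdz
        by_cases hh : hasAbba cur = true
        · simp [hh, ihe, ref]
        · simp only [Bool.not_eq_true] at hh
          simp [hh, ihe, ref]
      · by_cases hh : hasAbba cur = true
        · simp [hh, hdz]
        · simp only [Bool.not_eq_true] at hh
          simp [hh, ihe, ref]
    · by_cases hb2 : ch = ']'
      · subst hb2
        rw [buildSegs]
        simp only [show ((']' : Char) == '[') = false by decide, Bool.false_eq_true, if_false,
                   if_pos (by rfl : ((']' : Char) == ']') = true)]
        rw [checkSegs, ref_append cur _ depth outside hnb,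
            hasAbbaPre_bracket cur ']' rest (by decide)]
        by_cases hdz : depth = 0
        · subst hdz
          by_cases hh : hasAbba cur = true
          · simp [hh, ihe, ref]
          · simp only [Bool.not_eq_true] at hh
            simp [hh, ihe, ref]
        · by_cases hh : hasAbba cur = true
          · simp [hh, hdz]
          · simp only [Bool.not_eq_true] at hh
            simp [hh, ihe, ref]
      · rw [buildSegs]
        simp only [show (ch == '[') = false by simp [hb1],
                   show (ch == ']') = false by simp [hb2], Bool.false_eq_true, if_false]
        rw [ih depth (cur ++ [ch]) outside
              (by intro x hx
                  rcases List.mem_append.1 hx with h | h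
                  · exact hnb x h
                  · simp at h; subst h; exact ⟨hb1, hb2⟩)]
        rw [List.append_assoc]
        rfl

-- ===== VERDICT (by name: the statement is the Claim_ definition above) =====
theorem is_tls_spec : Claim_equal_is_tls := by
  intro s _
  unfold Spec_is_tls is_tls is_tls_alt
  have hlen : PySem.Str.len s = (s.toList.length : Int) := by simp [PySem.Str.len_eq]
  have h1 : tlsLoop s.toList (PySem.List.pyRange 0 ((s.toList.length : Int) - 3) 1) false 0 =
      ref s.toList 0 false := by
    simpa using tlsLoop_eq_ref s.toList s.toList.length 0 false 0 (by omega)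
  have h2 : checkSegs (buildSegs s.toList 0 []) false = ref s.toList 0 false := by
    simpa using checkSegs_buildSegs_eq_ref s.toList 0 [] false (by simp)
  rw [hlen, h1, h2]
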